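-- pv_equiv track=rewrite | github.com/aialuke/prompt-improver | src/prompt_improver/database/health/database_health_monitor.py | _analyze_connection_states
-- ===== SOURCE A (Python) =====
-- from typing import Any, Dict, List, Optional
--
-- def _analyze_connection_states(connections: List[Dict[str, Any]]) -> Dict[str, int]:
--     """
--     Analyze connection state distribution
--     """
--     states = {
--         "active": 0,
--         "idle": 0,
--         "idle_in_transaction": 0,
--         "idle_in_transaction_aborted": 0,
--         "fastpath_function_call": 0,
--         "disabled": 0
--     }
--
--     for conn in connections:
--         state = conn.get("state", "unknown")
--         if state in states:
--             states[state] += 1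
--         else:
--             states["disabled"] += 1  # Count unknown states as disabled
--
--     return states
-- ===== SOURCE B (Python) =====
-- def _analyze_connection_states(connections):
--     # Pass 1: full frequency table of raw states.
--     counts = {}
--     for conn in connections:
--         s = conn.get("state", "unknown")
--         counts[s] = counts.get(s, 0) + 1
--     # Pass 2: project the table onto the fixed buckets.
--     keys = ["active", "idle", "idle_in_transaction", "idle_in_transaction_aborted",
--             "fastpath_function_call", "disabled"]
--     states = {k: counts.get(k, 0) for k in keys}
--     # Fold every non-bucket state into 'disabled'.
--     states["disabled"] += sum(v for k, v in counts.items() if k not in states)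
--     return states
-- ===== Notes on version B (the rewrite author's own statement) =====
-- stated objective: alternative
-- what changed: B replaces A's single-pass per-connection branch with a frequency-table build (counts of raw states), a second pass assigning the six fixed buckets from the table, and a final fold of all non-bucket counts into 'disabled'.
import Mathlib
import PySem

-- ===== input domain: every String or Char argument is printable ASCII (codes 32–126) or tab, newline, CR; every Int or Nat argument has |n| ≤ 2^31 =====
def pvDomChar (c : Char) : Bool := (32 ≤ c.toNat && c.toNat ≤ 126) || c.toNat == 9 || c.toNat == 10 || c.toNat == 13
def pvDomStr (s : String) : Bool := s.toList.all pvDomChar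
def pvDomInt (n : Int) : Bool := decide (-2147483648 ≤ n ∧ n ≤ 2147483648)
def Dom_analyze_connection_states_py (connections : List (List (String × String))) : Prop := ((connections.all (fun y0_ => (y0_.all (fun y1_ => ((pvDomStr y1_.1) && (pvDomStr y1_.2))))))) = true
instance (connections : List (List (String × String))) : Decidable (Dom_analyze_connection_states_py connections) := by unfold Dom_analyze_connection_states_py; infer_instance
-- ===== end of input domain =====

-- B changes the decomposition (frequency table, then bucket pass, then fold leftovers into 'disabled'); same cost, no speed claim.

-- shared helper: conn.get("state", "unknown") on the association-list representation (first match)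
def pvGetState (conn : List (String × String)) : String :=
  (((conn.find? (fun p => p.1 == "state")).map (·.2)).getD "unknown")

-- ===== PORT A =====
def analyze_connection_states_py (connections : List (List (String × String))) : List (String × Int) :=
  let states0 : PySem.Dict String Int := PySem.Dict.ofList
    [("active", 0), ("idle", 0), ("idle_in_transaction", 0), ("idle_in_transaction_aborted", 0),
     ("fastpath_function_call", 0), ("disabled", 0)]
  let states := connections.foldl (fun st conn =>
    let state := pvGetState conn
    if st.contains state then st.modify state 0 (· + 1)
    else st.modify "disabled" 0 (· + 1)) states0
  states.items

-- ===== PORT B =====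
def analyze_connection_states_py_alt (connections : List (List (String × String))) : List (String × Int) :=
  let counts := connections.foldl (fun d conn =>
    let s := pvGetState conn
    d.insert s (d.getD s 0 + 1)) (PySem.Dict.empty : PySem.Dict String Int)
  let keys : List String := ["active", "idle", "idle_in_transaction", "idle_in_transaction_aborted",
                             "fastpath_function_call", "disabled"]
  let states := keys.foldl (fun st k => st.insert k (counts.getD k 0)) (PySem.Dict.empty : PySem.Dict String Int)
  let leftover := ((counts.items.filter (fun p => !(states.contains p.1))).map (·.2)).sum
  (states.modify "disabled" 0 (· + leftover)).items

-- ===== PRECONDITION & SPEC =====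
def Spec_analyze_connection_states_py (connections : List (List (String × String))) (out : List (String × Int)) : Prop := out = analyze_connection_states_py_alt connections
instance (connections : List (List (String × String))) (out : List (String × Int)) : Decidable (Spec_analyze_connection_states_py connections out) := by unfold Spec_analyze_connection_states_py; infer_instance

-- ===== CLAIM (what is proved, stated in full; the proofs are below) =====
def Claim_equal_analyze_connection_states_py : Prop := ∀ (connections : List (List (String × String))), Dom_analyze_connection_states_py connections → Spec_analyze_connection_states_py connections (analyze_connection_states_py connections)

-- ===== LEMMAS AND PROOFS =====

-- the six bucket keys
def pvK : List String := ["active", "idle", "idle_in_transaction", "idle_in_transaction_aborted",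
                          "fastpath_function_call", "disabled"]

-- A's per-connection bucketing, as a function on the raw state
def pvBucket (s : String) : String := if s ∈ pvK then s else "disabled"

-- A's loop body and initial dict, named for the proofs (defeq to the port's inline terms)
def pvBodyA (st : PySem.Dict String Int) (conn : List (String × String)) : PySem.Dict String Int :=
  if st.contains (pvGetState conn) then st.modify (pvGetState conn) 0 (· + 1)
  else st.modify "disabled" 0 (· + 1)

def pvInit : PySem.Dict String Int := PySem.Dict.ofList
  [("active", 0), ("idle", 0), ("idle_in_transaction", 0), ("idle_in_transaction_aborted", 0),
   ("fastpath_function_call", 0), ("disabled", 0)]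

lemma pvK_nodup : pvK.Nodup := by decide

lemma pvInit_keys : pvInit.keys = pvK := by decide

lemma A_unfold (conns : List (List (String × String))) :
    analyze_connection_states_py conns = (List.foldl pvBodyA pvInit conns).items := rfl

lemma count_bucket_of_ne (k : String) (hk : k ∈ pvK) (hne : k ≠ "disabled") (l : List String) :
    (l.map pvBucket).count k = l.count k := by
  induction l with
  | nil => simp
  | cons s t ih =>
    simp only [List.map_cons, List.count_cons, ih]
    congr 1
    by_cases hs : s ∈ pvK
    · simp [pvBucket, hs]
    · have h1 : pvBucket s = "disabled" := by simp [pvBucket, hs]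
      have h2 : s ≠ k := fun h => hs (h ▸ hk)
      simp [h1, h2, Ne.symm hne]

lemma count_bucket_disabled (l : List String) :
    (l.map pvBucket).count "disabled" =
      l.count "disabled" + l.countP (fun s => !decide (s ∈ pvK)) := by
  induction l with
  | nil => simp
  | cons s t ih =>
    simp only [List.map_cons, List.count_cons, List.countP_cons, ih]
    by_cases hs : s ∈ pvK
    · have h1 : pvBucket s = s := by simp [pvBucket, hs]
      simp [h1, hs]
      omega
    · have h1 : pvBucket s = "disabled" := by simp [pvBucket, hs]
      have h2 : s ≠ "disabled" := fun h => hs (h ▸ (by decide : "disabled" ∈ pvK))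
      simp [h1, h2, hs]
      omega

lemma A_inv (conns : List (List (String × String))) :
    ∀ d : PySem.Dict String Int, d.keys = pvK →
      (List.foldl pvBodyA d conns).keys = pvK ∧
      ∀ k, (List.foldl pvBodyA d conns).getD k 0 =
        d.getD k 0 + (((conns.map pvGetState).map pvBucket).count k : Int) := by
  induction conns with
  | nil => intro d hd; simp [hd]
  | cons c t ih =>
    intro d hd
    by_cases hc : d.contains (pvGetState c) = true
    · have hbody : pvBodyA d c = d.modify (pvGetState c) 0 (· + 1) := by simp [pvBodyA, hc]
      have hs : pvGetState c ∈ pvK := hd ▸ (PySem.Dict.contains_iff_mem_keys d _).1 hc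
      have hk2 : (d.modify (pvGetState c) 0 (· + 1)).keys = pvK := by
        rw [PySem.Dict.keys_modify, PySem.Dict.keys_insert_of_contains _ _ hc]
        exact hd
      obtain ⟨ihk, ihv⟩ := ih _ hk2
      refine ⟨by rw [List.foldl_cons, hbody]; exact ihk, ?_⟩
      intro k
      rw [List.foldl_cons, hbody, ihv k, PySem.Dict.getD_modify]
      have hbs : pvBucket (pvGetState c) = pvGetState c := by simp [pvBucket, hs]
      simp only [List.map_cons, List.count_cons, hbs]
      by_cases hks : k = pvGetState c
      · simp [hks]; ring
      · simp [hks, Ne.symm hks]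
    · have hbody : pvBodyA d c = d.modify "disabled" 0 (· + 1) := by simp [pvBodyA, hc]
      have hs : pvGetState c ∉ pvK := by
        intro h
        exact hc ((PySem.Dict.contains_iff_mem_keys d _).2 (hd ▸ h))
      have hcd : d.contains "disabled" = true :=
        (PySem.Dict.contains_iff_mem_keys d _).2 (hd ▸ (by decide : "disabled" ∈ pvK))
      have hk2 : (d.modify "disabled" 0 (· + 1)).keys = pvK := by
        rw [PySem.Dict.keys_modify, PySem.Dict.keys_insert_of_contains _ _ hcd]
        exact hd
      obtain ⟨ihk, ihv⟩ := ih _ hk2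
      refine ⟨by rw [List.foldl_cons, hbody]; exact ihk, ?_⟩
      intro k
      rw [List.foldl_cons, hbody, ihv k, PySem.Dict.getD_modify]
      have hbs : pvBucket (pvGetState c) = "disabled" := by simp [pvBucket, hs]
      simp only [List.map_cons, List.count_cons, hbs]
      by_cases hks : k = "disabled"
      · simp [hks]; ring
      · simp [hks, Ne.symm hks]

lemma leftover_eq (ss : List String) :
    ((((PySem.Set.ofList ss).filter (fun k => !decide (k ∈ pvK))).map
        (fun k => ((ss.count k : Nat) : Int))).sum) =
      ((ss.countP (fun s => !decide (s ∈ pvK)) : Nat) : Int) := by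
  have hperm : (PySem.Set.ofList ss).Perm ss.dedup := by
    rw [List.perm_ext_iff_of_nodup (PySem.Set.nodup_ofList ss) ss.nodup_dedup]
    intro a
    rw [PySem.Set.mem_ofList, List.mem_dedup]
  have hperm2 := (hperm.filter (fun k => !decide (k ∈ pvK))).map
    (fun k => ((ss.count k : Nat) : Int))
  rw [hperm2.sum_eq]
  have h := List.sum_map_count_dedup_filter_eq_countP (fun s => !decide (s ∈ pvK)) ss
  rw [← h, Nat.cast_list_sum, List.map_map]
  rfl

-- B's bucket dict and final dict, named for the proofs (defeq to the port's inline terms)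
def pvSix (c : PySem.Dict String Int) : PySem.Dict String Int :=
  pvK.foldl (fun st k => st.insert k (c.getD k 0)) PySem.Dict.empty

def pvFinalB (c : PySem.Dict String Int) : PySem.Dict String Int :=
  (pvSix c).modify "disabled" 0
    (· + ((c.items.filter (fun p => !((pvSix c).contains p.1))).map (·.2)).sum)

lemma B_unfold (conns : List (List (String × String))) :
    analyze_connection_states_py_alt conns =
      (pvFinalB (List.foldl (fun d conn => d.insert (pvGetState conn) (d.getD (pvGetState conn) 0 + 1))
        PySem.Dict.empty conns)).items := rfl

lemma six_items (c : PySem.Dict String Int) :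
    (pvSix c).items = pvK.map (fun k => (k, c.getD k 0)) := by
  have h := PySem.Dict.items_foldl_insert_fresh pvK id (fun k => c.getD k 0) PySem.Dict.empty
    (by simp) (by simp; decide)
  simpa [pvSix] using h

lemma six_keys (c : PySem.Dict String Int) : (pvSix c).keys = pvK := by
  simp only [PySem.Dict.keys, six_items, List.map_map]
  have h : ((fun x : String × Int => x.1) ∘ fun k => (k, c.getD k 0)) = id := rfl
  rw [h, List.map_id]

lemma six_contains (c : PySem.Dict String Int) (x : String) :
    (pvSix c).contains x = decide (x ∈ pvK) := by
  rw [PySem.Dict.contains_eq_decide_mem_keys, six_keys]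

lemma six_getD (c : PySem.Dict String Int) (k : String) (hk : k ∈ pvK) :
    (pvSix c).getD k 0 = c.getD k 0 := by
  refine PySem.Dict.getD_of_mem_items _ ?_ ?_ 0
  · rw [six_items]; exact List.mem_map.2 ⟨k, hk, rfl⟩
  · rw [six_keys]; exact pvK_nodup

lemma finalB_keys (c : PySem.Dict String Int) : (pvFinalB c).keys = pvK := by
  have hcd : (pvSix c).contains "disabled" = true := by rw [six_contains]; decide
  simp only [pvFinalB]
  rw [PySem.Dict.keys_modify, PySem.Dict.keys_insert_of_contains _ _ hcd, six_keys]

-- ===== VERDICT (by name: the statement is the Claim_ definition above) =====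
theorem analyze_connection_states_py_spec : Claim_equal_analyze_connection_states_py := by
  intro conns _
  unfold Spec_analyze_connection_states_py
  rw [A_unfold, B_unfold]
  set ss := conns.map pvGetState with hss
  have hcnts : (List.foldl (fun d conn => d.insert (pvGetState conn) (d.getD (pvGetState conn) 0 + 1))
      (PySem.Dict.empty : PySem.Dict String Int) conns) = PySem.Dict.counter ss := by
    rw [hss, ← PySem.Dict.foldl_insert_getD_add_one_eq_counter, List.foldl_map]
  rw [hcnts]
  set c := PySem.Dict.counter ss with hc
  obtain ⟨hAkeys, hAval⟩ := A_inv conns pvInit pvInit_keys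
  have hAnodup : (List.foldl pvBodyA pvInit conns).keys.Nodup := by rw [hAkeys]; exact pvK_nodup
  have hfnodup : (pvFinalB c).keys.Nodup := by rw [finalB_keys]; exact pvK_nodup
  have hleft : ((c.items.filter (fun p => !((pvSix c).contains p.1))).map (·.2)).sum =
      ((ss.countP (fun s => !decide (s ∈ pvK)) : Nat) : Int) := by
    rw [hc, PySem.Dict.items_counter, List.filter_map, List.map_map]
    have hpred : ((fun p => !((pvSix c).contains p.1)) ∘ (fun k => (k, ((ss.count k : Nat) : Int))))
        = (fun k => !decide (k ∈ pvK)) := by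
      funext k; simp [six_contains]
    have hval : ((fun p => p.2) ∘ (fun k => (k, ((ss.count k : Nat) : Int))))
        = (fun k => ((ss.count k : Nat) : Int)) := rfl
    rw [hpred, hval]
    exact leftover_eq ss
  have hfval : ∀ k, (pvFinalB c).getD k 0 =
      if k = "disabled" then (pvSix c).getD "disabled" 0 +
        ((c.items.filter (fun p => !((pvSix c).contains p.1))).map (·.2)).sum
      else (pvSix c).getD k 0 := by
    intro k
    simp only [pvFinalB]
    rw [PySem.Dict.getD_modify]
  rw [PySem.Dict.items_eq_map_keys _ hAnodup 0, PySem.Dict.items_eq_map_keys _ hfnodup 0,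
    hAkeys, finalB_keys]
  refine List.map_congr_left ?_
  intro k hk
  have hmem : k ∈ pvK := hk
  refine congrArg (Prod.mk k) ?_
  rw [hAval k, hfval k]
  have hku : k = "active" ∨ k = "idle" ∨ k = "idle_in_transaction" ∨
      k = "idle_in_transaction_aborted" ∨ k = "fastpath_function_call" ∨ k = "disabled" := by
    simpa [pvK] using hmem
  rcases hku with rfl | rfl | rfl | rfl | rfl | rfl
  case _ => rw [if_neg (by decide), six_getD _ _ (by decide), hc, PySem.Dict.getD_counter,
      count_bucket_of_ne _ (by decide) (by decide),
      show pvInit.getD _ 0 = 0 from by decide, zero_add, hss]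
  case _ => rw [if_neg (by decide), six_getD _ _ (by decide), hc, PySem.Dict.getD_counter,
      count_bucket_of_ne _ (by decide) (by decide),
      show pvInit.getD _ 0 = 0 from by decide, zero_add, hss]
  case _ => rw [if_neg (by decide), six_getD _ _ (by decide), hc, PySem.Dict.getD_counter,
      count_bucket_of_ne _ (by decide) (by decide),
      show pvInit.getD _ 0 = 0 from by decide, zero_add, hss]
  case _ => rw [if_neg (by decide), six_getD _ _ (by decide), hc, PySem.Dict.getD_counter,
      count_bucket_of_ne _ (by decide) (by decide),
      show pvInit.getD _ 0 = 0 from by decide, zero_add, hss]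
  case _ => rw [if_neg (by decide), six_getD _ _ (by decide), hc, PySem.Dict.getD_counter,
      count_bucket_of_ne _ (by decide) (by decide),
      show pvInit.getD _ 0 = 0 from by decide, zero_add, hss]
  case _ =>
    rw [if_pos rfl, hleft, six_getD _ _ (by decide), hc, PySem.Dict.getD_counter,
      count_bucket_disabled]
    have hinit : pvInit.getD "disabled" 0 = 0 := by decide
    rw [hinit, hss]
    push_cast
    ring
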